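-- pv_equiv track=rewrite | github.com/danielle-elsey/Chem_GA_Project | src/technique_practice.py | find_sequences
-- ===== SOURCE A (Python) =====
-- import string
-- from itertools import product
--
-- def find_sequences(num_type_mono):
--     #find length of each sequence
--     seq_len = num_type_mono**2
--
--     #find all possible sequences as numerical lists [start index 0]
--     #(use cartesian product of each type of monomer over sequence length)
--     numer_seqs = product(range(num_type_mono), repeat=seq_len)
--
--
--     #create dictionary mapping numbers [start index 0] to uppercase English alphabet letters
--     alpha_dict = dict(zip(range(26), string.ascii_uppercase))
--     #translate numerical sequences into alphabetic find_sequences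
--     alpha_seqs = []
--     for sequence in numer_seqs:
--         temp_seq = []
--         for number in sequence:
--             temp_seq.append(alpha_dict[number])
--         alpha_seqs.append(temp_seq)
--
--     return alpha_seqs
-- ===== SOURCE B (Python) =====
-- import string
--
--
-- def find_sequences(num_type_mono):
--     # Enumerate by rank: each sequence is the seq_len-digit base-b numeral of
--     # its ordinal (most significant digit first), with digits drawn from the
--     # symbol table.
--     seq_len = num_type_mono ** 2
--     alpha_dict = dict(zip(range(26), string.ascii_uppercase))
--     symbols = [alpha_dict[k] for k in range(num_type_mono)]
--     total = len(symbols) ** seq_len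
--     alpha_seqs = []
--     for rank in range(total):
--         digits = []
--         for _ in range(seq_len):
--             rank, d = divmod(rank, len(symbols))
--             digits.append(symbols[d])
--         digits.reverse()
--         alpha_seqs.append(digits)
--     return alpha_seqs
-- ===== Notes on version B (the rewrite author's own statement) =====
-- stated objective: alternative
-- what changed: Replaces the itertools.product generator (incrementally extending all partial tuples) by direct rank-to-digits arithmetic: a symbol table is built once, then each output sequence is computed independently as the seq_len base-b digits of its ordinal via repeated divmod, most significant digit first; Pre_ excludes num_type_mono >= 27, where A raises KeyError.
-- outside the precondition, e.g. on find_sequences(27): A raises KeyError, B raises KeyError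
import Mathlib
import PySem

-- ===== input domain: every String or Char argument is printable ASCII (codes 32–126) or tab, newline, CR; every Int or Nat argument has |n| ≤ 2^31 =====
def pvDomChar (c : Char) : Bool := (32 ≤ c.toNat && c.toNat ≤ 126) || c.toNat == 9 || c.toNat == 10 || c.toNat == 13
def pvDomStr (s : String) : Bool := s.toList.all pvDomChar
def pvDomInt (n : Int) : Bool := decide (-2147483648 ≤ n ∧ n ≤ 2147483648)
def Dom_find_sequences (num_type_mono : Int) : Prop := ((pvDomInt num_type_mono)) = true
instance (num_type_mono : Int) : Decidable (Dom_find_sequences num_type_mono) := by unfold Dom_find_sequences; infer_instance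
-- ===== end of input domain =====

-- B replaces the itertools.product accumulation by per-ordinal divmod digit extraction over a precomputed symbol table (alternative decomposition, same output order).

-- shared helper: alpha_dict = dict(zip(range(26), string.ascii_uppercase)) — built identically in both Pythons
def alpha_dict : PySem.Dict Int String :=
  PySem.Dict.ofList ((PySem.List.pyRange 0 26 1).zip
    (("ABCDEFGHIJKLMNOPQRSTUVWXYZ".toList).map (fun c => String.ofList [c])))

-- alpha_dict[k]; the `getD ""` default is never used inside Pre_ (KeyError inputs are excluded)
def alphaLookup (k : Int) : String := (alpha_dict.get? k).getD ""

-- ===== PORT A =====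
def find_sequences (num_type_mono : Int) : List (List String) :=
  let seq_len : Int := num_type_mono ^ 2
  -- itertools.product(range(num_type_mono), repeat=seq_len): extend every partial tuple by
  -- every element of range(num_type_mono), seq_len times (last position varies fastest)
  let numer_seqs : List (List Int) :=
    (PySem.List.pyRange 0 seq_len 1).foldl
      (fun acc _ => acc.flatMap (fun t => (PySem.List.pyRange 0 num_type_mono 1).map (fun x => t ++ [x])))
      [[]]
  let alpha_seqs : List (List String) :=
    numer_seqs.foldl
      (fun alpha_seqs sequence =>
        alpha_seqs ++ [sequence.foldl (fun temp_seq number => temp_seq ++ [alphaLookup number]) []])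
      []
  alpha_seqs

-- ===== PORT B =====
-- base ** e: binary exponentiation (as CPython's int.__pow__ computes it); the fuel
-- argument only bounds the recursion depth (e halves each step) and is never exhausted
def pyPowAux : Nat → Int → Nat → Int
  | 0, _, _ => 1
  | f + 1, b, e =>
      if e = 0 then 1
      else
        let r := pyPowAux f (b * b) (e / 2)
        if e % 2 = 1 then b * r else r

def pyPow (b : Int) (e : Nat) : Int := pyPowAux e b e

-- symbols[d]; the `""` default of pyGetD is never used (d = rank % len(symbols) is in range whenever the loop runs)
def find_sequences_alt (num_type_mono : Int) : List (List String) :=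
  let seq_len : Int := num_type_mono ^ 2
  let symbols : List String := (PySem.List.pyRange 0 num_type_mono 1).map alphaLookup
  -- len(symbols) ** seq_len; seq_len = num_type_mono² ≥ 0, so the Nat exponent is exact
  let total : Int := pyPow (symbols.length : Int) seq_len.toNat
  (PySem.List.pyRange 0 total 1).foldl
    (fun alpha_seqs rank =>
      let st :=
        (PySem.List.pyRange 0 seq_len 1).foldl
          (fun (st : Int × List String) _ =>
            (PySem.Int.floordiv st.1 (symbols.length : Int),
             st.2 ++ [PySem.List.pyGetD symbols (PySem.Int.mod st.1 (symbols.length : Int)) ""]))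
          (rank, [])
      alpha_seqs ++ [st.2.reverse])
    []

-- ===== PRECONDITION & SPEC =====
-- Pre_ excludes num_type_mono ≥ 27, on which A raises KeyError (alpha_dict has only 26 letters).
def Pre_find_sequences (num_type_mono : Int) : Prop := num_type_mono ≤ 26
instance (num_type_mono : Int) : Decidable (Pre_find_sequences num_type_mono) := by unfold Pre_find_sequences; infer_instance
def pvWitness_find_sequences : Int := 2

def Spec_find_sequences (num_type_mono : Int) (out : List (List String)) : Prop := out = find_sequences_alt num_type_mono
instance (num_type_mono : Int) (out : List (List String)) : Decidable (Spec_find_sequences num_type_mono out) := by unfold Spec_find_sequences; infer_instance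

-- ===== CLAIM (what is proved, stated in full; the proofs are below) =====
def Claim_equal_find_sequences : Prop := ∀ (num_type_mono : Int), Dom_find_sequences num_type_mono → Pre_find_sequences num_type_mono → Spec_find_sequences num_type_mono (find_sequences num_type_mono)

-- ===== LEMMAS AND PROOFS =====

theorem pyPowAux_eq : ∀ (f e : Nat), e ≤ f → ∀ (b : Int), pyPowAux f b e = b ^ e := by
  intro f
  induction f with
  | zero =>
      intro e he b
      have : e = 0 := by omega
      simp [pyPowAux, this]
  | succ f ih =>
      intro e he b
      by_cases h : e = 0
      · simp [pyPowAux, h]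
      · have hle : e / 2 ≤ f := by
          have := Nat.div_lt_self (Nat.pos_of_ne_zero h) (by norm_num : 1 < 2)
          omega
        simp only [pyPowAux, h, if_false]
        rw [ih (e / 2) hle (b * b)]
        have hb : b * b = b ^ 2 := by ring
        rcases Nat.mod_two_eq_zero_or_one e with h2 | h2
        · rw [if_neg (by omega), hb, ← pow_mul]
          congr 1
          omega
        · rw [if_pos h2, hb, ← pow_mul, ← pow_succ']
          congr 1
          omega

theorem pyPow_eq (b : Int) (e : Nat) : pyPow b e = b ^ e := pyPowAux_eq e e le_rfl b

-- a fold that ignores the elements is an iterate of the step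
theorem pv_foldl_ignore {α β : Type} (g : β → β) : ∀ (l : List α) (init : β),
    l.foldl (fun acc _ => g acc) init = g^[l.length] init := by
  intro l
  induction l with
  | nil => intro init; rfl
  | cons x xs ih =>
      intro init
      simp [List.foldl, ih, Function.iterate_succ_apply]

-- appending singletons in a fold is a map
theorem pv_foldl_push {α β : Type} (f : α → β) : ∀ (l : List α) (acc : List β),
    l.foldl (fun a x => a ++ [f x]) acc = acc ++ l.map f := by
  intro l
  induction l with
  | nil => intro acc; simp
  | cons x xs ih => intro acc; simp [List.foldl, ih]

-- range(a*b) split into b-sized blocks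
theorem pv_range_mul_flatMap {β : Type} (b : Nat) (f : Nat → β) : ∀ (a : Nat),
    (List.range (a * b)).map f
      = (List.range a).flatMap (fun q => (List.range b).map (fun r => f (q * b + r))) := by
  intro a
  induction a with
  | zero => simp
  | succ a ih =>
      have h1 : (a + 1) * b = a * b + b := by ring
      rw [h1, List.range_add, List.range_succ]
      simp [ih, List.flatMap_append, Function.comp]

-- base-b digits of i, m digits, most significant first
def digitsMSB (b : Nat) : Nat → Nat → List Nat
  | 0, _ => []
  | m + 1, i => digitsMSB b m (i / b) ++ [i % b]

-- base-b digits of i, m digits, least significant first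
def digitsLSB (b : Nat) : Nat → Nat → List Nat
  | 0, _ => []
  | m + 1, i => i % b :: digitsLSB b m (i / b)

theorem pv_digitsLSB_reverse (b : Nat) : ∀ (m i : Nat),
    (digitsLSB b m i).reverse = digitsMSB b m i := by
  intro m
  induction m with
  | zero => intro i; rfl
  | succ m ih => intro i; simp [digitsLSB, digitsMSB, ih]

theorem pv_digitsLSB_lt (b : Nat) (hb : 0 < b) : ∀ (m i : Nat), ∀ d ∈ digitsLSB b m i, d < b := by
  intro m
  induction m with
  | zero => intro i d hd; simp [digitsLSB] at hd
  | succ m ih =>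
      intro i d hd
      rcases List.mem_cons.mp hd with h | h
      · subst h; exact Nat.mod_lt _ hb
      · exact ih _ d h

-- the product-building step over Nat
def natStep (b : Nat) (acc : List (List Nat)) : List (List Nat) :=
  acc.flatMap (fun t => (List.range b).map (fun x => t ++ [x]))

theorem pv_natStep_iterate (b : Nat) (hb : 0 < b) : ∀ (m : Nat),
    (natStep b)^[m] [[]] = (List.range (b ^ m)).map (digitsMSB b m) := by
  intro m
  induction m with
  | zero => simp [digitsMSB]
  | succ m ih =>
      rw [Function.iterate_succ_apply', ih]
      have hpow : b ^ (m + 1) = b ^ m * b := by ring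
      rw [natStep, List.flatMap_map]
      rw [hpow, pv_range_mul_flatMap b (digitsMSB b (m + 1))]
      apply List.flatMap_congr
      intro q _
      apply List.map_congr_left
      intro r hr
      have hrb : r < b := List.mem_range.mp hr
      have hdiv : (q * b + r) / b = q := by
        rw [mul_comm q b, Nat.mul_add_div hb, Nat.div_eq_of_lt hrb]; omega
      have hmod : (q * b + r) % b = r := by
        rw [mul_comm q b, Nat.mul_add_mod, Nat.mod_eq_of_lt hrb]
      simp [digitsMSB, hdiv, hmod]

-- a flatMap-step fold started from [] stays []
theorem pv_foldl_flatMap_nil {α β : Type} (f : List β → List (List β)) : ∀ (l : List α),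
    l.foldl (fun acc _ => acc.flatMap f) ([] : List (List β)) = [] := by
  intro l
  induction l with
  | nil => rfl
  | cons x xs ih => simpa [List.foldl] using ih

-- A's product iteration over Int is the Nat one, cast
theorem pv_intStep_iterate (b : Nat) : ∀ (m : Nat),
    (fun acc : List (List Int) =>
      acc.flatMap (fun t => (PySem.List.pyRange 0 (b : Int) 1).map (fun x => t ++ [x])))^[m] [[]]
      = ((natStep b)^[m] [[]]).map (List.map (fun k : Nat => (k : Int))) := by
  intro m
  induction m with
  | zero => rfl
  | succ m ih =>
      rw [Function.iterate_succ_apply', Function.iterate_succ_apply', ih, natStep]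
      rw [PySem.List.pyRange_zero_natCast, List.flatMap_map, List.map_flatMap]
      apply List.flatMap_congr
      intro t _
      simp [List.map_map, Function.comp]

-- B's inner divmod loop extracts LSB-first digits and divides out (g = the symbol lookup)
theorem pv_divmod_iterate (b : Nat) (g : Int → String) : ∀ (m i : Nat) (acc : List String),
    (fun st : Int × List String =>
        (PySem.Int.floordiv st.1 (b : Int), st.2 ++ [g (PySem.Int.mod st.1 (b : Int))]))^[m]
      ((i : Int), acc)
      = ((↑(i / b ^ m) : Int), acc ++ (digitsLSB b m i).map (fun d => g (d : Int))) := by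
  intro m
  induction m with
  | zero => intro i acc; simp [digitsLSB]
  | succ m ih =>
      intro i acc
      rw [Function.iterate_succ_apply]
      simp only [PySem.Int.floordiv_natCast, PySem.Int.mod_natCast]
      rw [ih]
      have hdiv : i / b / b ^ m = i / b ^ (m + 1) := by
        rw [Nat.div_div_eq_div_mul, pow_succ, mul_comm]
      rw [hdiv]
      simp [digitsLSB]

-- cast-fusion of the two map shapes the folds leave behind
theorem pv_map_comp_cast {γ : Type} (g : Int → γ) : ∀ (l : List Nat),
    l.map (g ∘ (fun k : Nat => (k : Int)))
      = List.map (fun d => g d) (List.flatMap (fun a : Nat => [(a : Int)]) l) := by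
  intro l
  induction l with
  | nil => rfl
  | cons x xs ih => simp [ih, Function.comp]

-- the positive case: A = B at ↑b for 0 < b
theorem pv_main_pos (b : Nat) (hb : 0 < b) :
    find_sequences (b : Int) = find_sequences_alt (b : Int) := by
  have hsq : ((b : Int) ^ 2) = ((b ^ 2 : Nat) : Int) := by push_cast; ring
  have hsymlen : (((PySem.List.pyRange 0 (b : Int) 1).map alphaLookup).length : Int) = (b : Int) := by
    rw [List.length_map, PySem.List.length_pyRange_one]
    simp
  have hpow : pyPow (b : Int) ((((b ^ 2 : Nat) : Int)).toNat) = ((b ^ b ^ 2 : Nat) : Int) := by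
    rw [pyPow_eq, Int.toNat_natCast]; push_cast; ring
  rw [find_sequences, find_sequences_alt]
  simp only [hsq, hsymlen, hpow]
  -- A side
  rw [pv_foldl_ignore
        (fun acc : List (List Int) =>
          acc.flatMap (fun t => (PySem.List.pyRange 0 (b : Int) 1).map (fun x => t ++ [x]))),
      PySem.List.length_pyRange_one]
  have hlen : (((b ^ 2 : Nat) : Int) - 0).toNat = b ^ 2 := by rw [Int.sub_zero, Int.toNat_natCast]
  rw [hlen, pv_intStep_iterate b (b ^ 2), pv_natStep_iterate b hb (b ^ 2)]
  rw [pv_foldl_push, List.nil_append, List.map_map, List.map_map]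
  -- B side
  set g : Int → String :=
    fun x => PySem.List.pyGetD ((PySem.List.pyRange 0 (b : Int) 1).map alphaLookup) x "" with hg
  have houter := PySem.List.pyRange_zero_natCast (b ^ b ^ 2)
  rw [houter,
      pv_foldl_push
        (fun i : Int =>
          ((PySem.List.pyRange 0 ((b ^ 2 : Nat) : Int) 1).foldl
            (fun (st : Int × List String) _ =>
              (PySem.Int.floordiv st.1 (b : Int), st.2 ++ [g (PySem.Int.mod st.1 (b : Int))]))
            (i, [])).2.reverse),
      List.nil_append, List.map_map]
  apply List.map_congr_left
  intro i _
  simp only [Function.comp]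
  rw [pv_foldl_ignore
        (fun st : Int × List String =>
          (PySem.Int.floordiv st.1 (b : Int), st.2 ++ [g (PySem.Int.mod st.1 (b : Int))])),
      PySem.List.length_pyRange_one, hlen, pv_divmod_iterate b g (b ^ 2) i []]
  rw [List.nil_append, pv_foldl_push, List.nil_append, List.map_map]
  -- identify the symbol-table lookup with the dict lookup on the in-range digits
  have hmapg : (digitsLSB b (b ^ 2) i).map (g ∘ fun k : Nat => (k : Int))
      = (digitsLSB b (b ^ 2) i).map (alphaLookup ∘ fun k : Nat => (k : Int)) := by
    apply List.map_congr_left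
    intro d hd
    have hdb : d < b := pv_digitsLSB_lt b hb (b ^ 2) i d hd
    simp only [Function.comp, hg]
    exact PySem.List.pyGetD_map_pyRange_of_nonneg alphaLookup (b : Int) (d : Int) ""
      (by positivity) (by exact_mod_cast hdb)
  simp only [← pv_digitsLSB_reverse, List.map_reverse]
  exact congrArg List.reverse (hmapg.symm.trans (pv_map_comp_cast g _))

-- ===== VERDICT (by name: the statement is the Claim_ definition above) =====
theorem find_sequences_spec : Claim_equal_find_sequences := by
  intro n _ _
  unfold Spec_find_sequences
  rcases lt_trichotomy n 0 with hneg | hzero | hpos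
  · -- n < 0: A's inner range is empty, B's symbol table is empty so total = 0; both return []
    have hn0 : n ≠ 0 := by omega
    have hsq : (0 : Int) < n ^ 2 := by positivity
    have hr : PySem.List.pyRange 0 n 1 = [] := PySem.List.pyRange_one_eq_nil (by omega)
    have hA : find_sequences n = [] := by
      have hc : PySem.List.pyRange 0 (n ^ 2) 1 = 0 :: PySem.List.pyRange 1 (n ^ 2) 1 :=
        PySem.List.pyRange_one_cons (by omega)
      simp only [find_sequences, hr, hc, List.foldl_cons, List.map_nil]
      rw [show (([[]] : List (List Int)).flatMap fun _ => ([] : List (List Int))) = [] from rfl]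
      rw [pv_foldl_flatMap_nil]
      rfl
    have hB : find_sequences_alt n = [] := by
      rw [find_sequences_alt]
      have hm : (n ^ 2).toNat ≠ 0 := by
        have : (1 : Int) ≤ n ^ 2 := by omega
        omega
      rw [hr]
      simp only [List.map_nil, List.length_nil, Nat.cast_zero]
      rw [pyPow_eq, zero_pow hm]
      rw [PySem.List.pyRange_one_eq_nil (by omega : (0:Int) ≤ 0)]
      rfl
    rw [hA, hB]
  · subst hzero; decide
  · obtain ⟨b, rfl⟩ : ∃ b : Nat, n = (b : Int) :=
      ⟨n.toNat, (Int.toNat_of_nonneg (by omega)).symm⟩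
    exact pv_main_pos b (by exact_mod_cast hpos)
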